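-- pv_equiv track=rewrite | github.com/Mardanyan1/VK_alogs | hw3.py | feed_animals
-- ===== SOURCE A (Python) =====
-- def feed_animals(animals, food):
--     if not animals or not food:
--         return 0
--     animals_sorted = sorted(animals)
--     food_sorted = sorted(food)
--     count = 0
--     for f in food_sorted:
--         if count < len(animals_sorted) and f >= animals_sorted[count]:
--             count += 1
--         if count == len(animals_sorted):
--             break
--     return count
-- ===== SOURCE B (Python) =====
-- def feed_animals(animals, food):
--     a = sorted(animals)
--     f = sorted(food)
--
--     def ok(k):
--         # the k smallest animals can be fed by the k largest foods
--         return all(a[i] <= f[len(f) - k + i] for i in range(k))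
--
--     lo, hi = 0, min(len(a), len(f))
--     while lo < hi:
--         mid = (lo + hi + 1) // 2
--         if ok(mid):
--             lo = mid
--         else:
--             hi = mid - 1
--     return lo
-- ===== Notes on version B (the rewrite author's own statement) =====
-- stated objective: alternative
-- what changed: Replaces A's greedy scan over the sorted food with a binary search on the answer k, using the feasibility check that the k smallest animals each fit under the k largest foods (a[i] <= f[m-k+i]); no element-by-element greedy matching is performed.
import Mathlib
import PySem

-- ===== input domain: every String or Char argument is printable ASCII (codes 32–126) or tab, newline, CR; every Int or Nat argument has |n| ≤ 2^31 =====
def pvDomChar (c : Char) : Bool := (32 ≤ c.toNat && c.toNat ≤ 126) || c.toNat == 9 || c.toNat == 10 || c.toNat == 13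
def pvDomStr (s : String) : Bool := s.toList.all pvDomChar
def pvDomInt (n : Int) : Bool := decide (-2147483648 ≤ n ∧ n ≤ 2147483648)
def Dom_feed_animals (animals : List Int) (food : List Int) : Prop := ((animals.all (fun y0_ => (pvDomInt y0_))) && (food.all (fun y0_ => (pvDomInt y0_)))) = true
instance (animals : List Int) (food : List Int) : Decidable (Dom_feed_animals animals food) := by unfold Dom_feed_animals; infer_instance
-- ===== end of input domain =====

-- B replaces A's greedy scan over the sorted food by a binary search for the largest k
-- such that the k smallest animals fit under the k largest foods; same value, same cost class.

-- ===== PORT A =====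
-- 'for f in food_sorted' with count and the break; animals_sorted[count] only read when count < len.
def feedA_loop (asrt : List Int) (count : Int) : List Int → Int
  | [] => count
  | f :: rest =>
    let count' :=
      if count < (asrt.length : Int) then
        match PySem.List.pyGet? asrt count with
        | some v => if v ≤ f then count + 1 else count
        | none => count
      else count
    if count' = (asrt.length : Int) then count'
    else feedA_loop asrt count' rest

def feed_animals (animals : List Int) (food : List Int) : Int :=
  if animals = [] ∨ food = [] then 0
  else
    let animals_sorted := PySem.List.sorted animals (fun x => x) false
    let food_sorted := PySem.List.sorted food (fun x => x) false
    feedA_loop animals_sorted 0 food_sorted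

-- ===== PORT B =====
-- ok(k) = all(a[i] <= f[len(f)-k+i] for i in range(k)); every callsite has k ≤ min(len a, len f),
-- so both indices are in range and getD is exact for Python's a[i] / f[...] there.
def okArr (a f : List Int) (k : Nat) : Bool :=
  (List.range k).all (fun i => decide (a.getD i 0 ≤ f.getD (f.length - k + i) 0))

-- the 'while lo < hi' binary search; (lo+hi+1)//2 on nonnegative ints is Nat division.
def bsearchB (a f : List Int) (lo hi : Nat) : Nat :=
  if lo < hi then
    let mid := (lo + hi + 1) / 2
    if okArr a f mid then bsearchB a f mid hi else bsearchB a f lo (mid - 1)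
  else lo
termination_by hi - lo
decreasing_by all_goals omega

def feed_animals_alt (animals : List Int) (food : List Int) : Int :=
  ((bsearchB (PySem.List.sorted animals (fun x => x) false)
      (PySem.List.sorted food (fun x => x) false) 0
      (min (PySem.List.sorted animals (fun x => x) false).length
        (PySem.List.sorted food (fun x => x) false).length) : Nat) : Int)

-- ===== PRECONDITION & SPEC =====
def Spec_feed_animals (animals : List Int) (food : List Int) (out : Int) : Prop := out = feed_animals_alt animals food
instance (animals : List Int) (food : List Int) (out : Int) : Decidable (Spec_feed_animals animals food out) := by unfold Spec_feed_animals; infer_instance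

-- ===== CLAIM (what is proved, stated in full; the proofs are below) =====
def Claim_equal_feed_animals : Prop := ∀ (animals : List Int) (food : List Int), Dom_feed_animals animals food → Spec_feed_animals animals food (feed_animals animals food)

-- ===== LEMMAS AND PROOFS =====

-- reference greedy on (remaining animals, remaining foods), recursing on the food list
def gRef : List Int → List Int → Int
  | _, [] => 0
  | as, f :: fs' =>
    match as with
    | [] => 0
    | a :: as' => if a ≤ f then 1 + gRef as' fs' else gRef (a :: as') fs'

def gRefN : List Int → List Int → Nat
  | _, [] => 0
  | as, f :: fs' =>
    match as with
    | [] => 0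
    | a :: as' => if a ≤ f then 1 + gRefN as' fs' else gRefN (a :: as') fs'

lemma gRef_nil (fs : List Int) : gRef [] fs = 0 := by
  cases fs <;> simp [gRef]

lemma gRefN_nil2 (as : List Int) : gRefN as [] = 0 := by
  cases as <;> simp [gRefN]

lemma gRef_eq_cast (as fs : List Int) : gRef as fs = (gRefN as fs : Int) := by
  fun_induction gRefN as fs with
  | case1 as => simp [gRef]
  | case2 f fs' => simp [gRef]
  | case3 f fs' a as' h ih => simp [gRef, h, ih]
  | case4 f fs' a as' h ih => simp [gRef, h, ih]

lemma feedA_loop_eq (asrt : List Int) :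
    ∀ (fs : List Int) (k : Nat), k ≤ asrt.length →
      feedA_loop asrt (k : Int) fs = (k : Int) + gRef (asrt.drop k) fs := by
  intro fs
  induction fs with
  | nil => intro k _; simp [feedA_loop, gRef]
  | cons f rest ih =>
    intro k hk
    rcases lt_or_eq_of_le hk with hlt | heq
    · have hltI : (k : Int) < (asrt.length : Int) := by exact_mod_cast hlt
      have hget : PySem.List.pyGet? asrt ((k : Nat) : Int) = some asrt[k] := by
        rw [PySem.List.pyGet?_natCast, List.getElem?_eq_getElem hlt]
      have hdrop : asrt.drop k = asrt[k] :: asrt.drop (k + 1) :=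
        List.drop_eq_getElem_cons hlt
      rw [feedA_loop]
      simp only [hget, if_pos hltI]
      by_cases hge : asrt[k] ≤ f
      · rw [if_pos hge]
        by_cases hbrk : (k : Int) + 1 = (asrt.length : Int)
        · rw [if_pos hbrk, hdrop]
          have hnil : asrt.drop (k + 1) = [] := by
            rw [List.drop_eq_nil_iff]; omega
          simp only [gRef, if_pos hge, hnil]
          rw [gRef_nil]; push_cast; ring
        · rw [if_neg hbrk]
          have hcast : ((k : Int) + 1) = ((k + 1 : Nat) : Int) := by push_cast; ring
          rw [hcast, ih (k + 1) (by omega), hdrop]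
          simp only [gRef, if_pos hge]
          push_cast; ring
      · rw [if_neg hge]
        have hne : ¬ ((k : Int) = (asrt.length : Int)) := by omega
        rw [if_neg hne, ih k hk, hdrop]
        simp only [gRef, if_neg hge]
    · have hnlt : ¬ ((k : Int) < (asrt.length : Int)) := by omega
      rw [feedA_loop]
      simp only [if_neg hnlt]
      have hEq : ((k : Int) = (asrt.length : Int)) := by omega
      rw [if_pos hEq]
      have hnil : asrt.drop k = [] := by rw [List.drop_eq_nil_iff]; omega
      rw [hnil]
      simp [gRef]

-- feasibility: the k smallest animals fit under the k largest foods
def FeasP (a f : List Int) (k : Nat) : Prop :=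
  k ≤ a.length ∧ k ≤ f.length ∧ ∀ i < k, a.getD i 0 ≤ f.getD (f.length - k + i) 0

lemma okArr_iff (a f : List Int) (k : Nat) :
    okArr a f k = true ↔ ∀ i < k, a.getD i 0 ≤ f.getD (f.length - k + i) 0 := by
  simp [okArr]

lemma getD_mono (f : List Int) (hf : f.Pairwise (· ≤ ·)) (p q : Nat)
    (hpq : p ≤ q) (hq : q < f.length) : f.getD p 0 ≤ f.getD q 0 := by
  rcases lt_or_eq_of_le hpq with h | h
  · rw [List.getD_eq_getElem f 0 (by omega), List.getD_eq_getElem f 0 hq]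
    exact (List.pairwise_iff_getElem.mp hf) p q (by omega) hq h
  · rw [h]

lemma gRefN_le (as fs : List Int) : gRefN as fs ≤ as.length ∧ gRefN as fs ≤ fs.length := by
  fun_induction gRefN as fs with
  | case1 as => exact ⟨Nat.zero_le _, Nat.zero_le _⟩
  | case2 f fs' => exact ⟨Nat.zero_le _, Nat.zero_le _⟩
  | case3 f fs' a as' h ih => simp only [List.length_cons] at ih ⊢; omega
  | case4 f fs' a as' h ih => simp only [List.length_cons] at ih ⊢; omega

lemma gRefN_feas (as fs : List Int) (ha : as.Pairwise (· ≤ ·)) (hf : fs.Pairwise (· ≤ ·)) :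
    FeasP as fs (gRefN as fs) := by
  fun_induction gRefN as fs with
  | case1 as => exact ⟨Nat.zero_le _, Nat.zero_le _, by omega⟩
  | case2 f fs' => exact ⟨Nat.zero_le _, Nat.zero_le _, by omega⟩
  | case3 f fs' a as' hle ih =>
    have hfhead : ∀ b ∈ fs', f ≤ b := (List.pairwise_cons.mp hf).1
    obtain ⟨h1, h2, h3⟩ := ih (List.Pairwise.of_cons ha) (List.Pairwise.of_cons hf)
    set g := gRefN as' fs' with hg
    refine ⟨by simp only [List.length_cons]; omega, by simp only [List.length_cons]; omega, ?_⟩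
    intro i hi
    have hidx : (f :: fs').length - (1 + g) + i = fs'.length - g + i := by
      simp only [List.length_cons]; omega
    rw [hidx]
    match i with
    | 0 =>
      simp only [List.getD_cons_zero]
      rcases lt_or_eq_of_le h2 with hglt | hgeq
      · have h1' : fs'.length - g + 0 = (fs'.length - g - 1) + 1 := by omega
        rw [h1', List.getD_cons_succ]
        have hmem : fs'.getD (fs'.length - g - 1) 0 = fs'[fs'.length - g - 1]'(by omega) :=
          List.getD_eq_getElem fs' 0 (by omega)
        calc a ≤ f := hle
          _ ≤ fs'.getD (fs'.length - g - 1) 0 := by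
              rw [hmem]; exact hfhead _ (List.getElem_mem _)
      · have : fs'.length - g + 0 = 0 := by omega
        rw [this, List.getD_cons_zero]; exact hle
    | i + 1 =>
      simp only [List.getD_cons_succ]
      have h1' : fs'.length - g + (i + 1) = (fs'.length - g + i) + 1 := by omega
      rw [h1', List.getD_cons_succ]
      exact h3 i (by omega)
  | case4 f fs' a as' hgt ih =>
    obtain ⟨h1, h2, h3⟩ := ih ha (List.Pairwise.of_cons hf)
    set g := gRefN (a :: as') fs' with hg
    refine ⟨h1, by simp only [List.length_cons]; omega, ?_⟩
    intro i hi
    have hidx : (f :: fs').length - g + i = (fs'.length - g + i) + 1 := by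
      simp only [List.length_cons]; omega
    rw [hidx, List.getD_cons_succ]
    exact h3 i hi

lemma feas_le_gRefN (as fs : List Int) (k : Nat) (h : FeasP as fs k) : k ≤ gRefN as fs := by
  induction fs generalizing as k with
  | nil => obtain ⟨_, h2, _⟩ := h; rw [gRefN_nil2]; simpa using h2
  | cons f fs' ih =>
    match as with
    | [] =>
      obtain ⟨h1, _, _⟩ := h; simp at h1; simp [gRefN, h1]
    | a :: as' =>
      obtain ⟨h1, h2, h3⟩ := h
      by_cases hle : a ≤ f
      · simp only [gRefN, if_pos hle]
        match k with
        | 0 => omega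
        | k' + 1 =>
          have : FeasP as' fs' k' := by
            refine ⟨by simpa using h1, by simpa using h2, ?_⟩
            intro j hj
            have := h3 (j + 1) (by omega)
            simp only [List.getD_cons_succ] at this
            have hidx : (f :: fs').length - (k' + 1) + (j + 1) = (fs'.length - k' + j) + 1 := by
              simp at h2 ⊢; omega
            rw [hidx, List.getD_cons_succ] at this
            exact this
          have := ih as' k' this
          omega
      · simp only [gRefN, if_neg hle]
        have hkm : k ≤ fs'.length := by
          by_contra hc
          have hk : k = fs'.length + 1 := by simp at h2; omega
          have := h3 0 (by omega)
          have hidx : (f :: fs').length - k + 0 = 0 := by simp; omega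
          rw [hidx] at this
          simp only [List.getD_cons_zero] at this
          omega
        refine ih (a :: as') k ⟨h1, hkm, ?_⟩
        intro i hi
        have := h3 i hi
        have hidx : (f :: fs').length - k + i = (fs'.length - k + i) + 1 := by simp; omega
        rw [hidx, List.getD_cons_succ] at this
        exact this

lemma feas_mono (a f : List Int) (hf : f.Pairwise (· ≤ ·)) (j k : Nat)
    (hjk : j ≤ k) (h : FeasP a f k) : FeasP a f j := by
  obtain ⟨h1, h2, h3⟩ := h
  refine ⟨by omega, by omega, ?_⟩
  intro i hi
  calc a.getD i 0 ≤ f.getD (f.length - k + i) 0 := h3 i (by omega)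
    _ ≤ f.getD (f.length - j + i) 0 := getD_mono f hf _ _ (by omega) (by omega)

lemma bsearchB_eq (a f : List Int) (g : Nat)
    (hokAll : ∀ k ≤ g, okArr a f k = true)
    (hnotAll : ∀ k, g < k → k ≤ min a.length f.length → okArr a f k = false)
    (lo hi : Nat) :
    lo ≤ g → g ≤ hi → hi ≤ min a.length f.length → bsearchB a f lo hi = g := by
  fun_induction bsearchB a f lo hi with
  | case1 lo hi hlt mid hok ih =>
    intro h1 h2 h3
    have hm : mid = (lo + hi + 1) / 2 := rfl
    have hmle : mid ≤ g := by
      by_contra hc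
      have hf2 := hnotAll mid (by omega) (by omega)
      simp [hok] at hf2
    exact ih hmle h2 h3
  | case2 lo hi hlt mid hok ih =>
    intro h1 h2 h3
    have hm : mid = (lo + hi + 1) / 2 := rfl
    have hgm : g < mid := by
      by_contra hc
      have ht := hokAll mid (by omega)
      simp [ht] at hok
    exact ih h1 (by omega) (by omega)
  | case3 lo hi hnlt =>
    intro h1 h2 h3; omega

lemma bsearchB_main (a f : List Int) (ha : a.Pairwise (· ≤ ·)) (hf : f.Pairwise (· ≤ ·)) :
    bsearchB a f 0 (min a.length f.length) = gRefN a f := by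
  have hfeas := gRefN_feas a f ha hf
  have hle := gRefN_le a f
  refine bsearchB_eq a f (gRefN a f) ?_ ?_ 0 (min a.length f.length)
    (Nat.zero_le _) (by omega) (le_refl _)
  · intro k hk
    exact (okArr_iff a f k).mpr (feas_mono a f hf k (gRefN a f) hk hfeas).2.2
  · intro k hk hkN
    by_contra hc
    have hok : okArr a f k = true := by
      cases h : okArr a f k
      · exact absurd h hc
      · rfl
    have : FeasP a f k := ⟨by omega, by omega, (okArr_iff a f k).mp hok⟩
    have := feas_le_gRefN a f k this
    omega

lemma sorted_pw (l : List Int) :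
    (PySem.List.sorted l (fun x => x) false).Pairwise (· ≤ ·) :=
  PySem.List.sorted_pairwise l (fun x => x) 

-- ===== VERDICT (by name: the statement is the Claim_ definition above) =====
theorem feed_animals_spec : Claim_equal_feed_animals := by
  intro animals food _
  unfold Spec_feed_animals feed_animals feed_animals_alt
  by_cases h : animals = [] ∨ food = []
  · rw [if_pos h]
    have hmin : min (PySem.List.sorted animals (fun x => x) false).length
        (PySem.List.sorted food (fun x => x) false).length = 0 := by
      rcases h with rfl | rfl <;> simp [PySem.List.sorted]
    simp only [hmin]
    rw [bsearchB]
    simp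
  · rw [if_neg h]
    have hA := feedA_loop_eq (PySem.List.sorted animals (fun x => x) false)
      (PySem.List.sorted food (fun x => x) false) 0 (Nat.zero_le _)
    simp only [Nat.cast_zero, List.drop_zero, zero_add] at hA
    rw [hA, gRef_eq_cast,
      bsearchB_main _ _ (sorted_pw animals) (sorted_pw food)]
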